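-- pv_equiv track=rewrite | github.com/casalm26/playground-automation | services/content-api/app/content_preview.py | _format_linkedin_content
-- ===== SOURCE A (Python) =====
-- def _format_linkedin_content(content: str) -> str:
--     """Format content for LinkedIn"""
--     # Professional formatting
--     # Add line breaks for readability
--     sentences = content.split('. ')
--     if len(sentences) > 3:
--         # Add paragraph breaks every 2-3 sentences
--         formatted_sentences = []
--         for i, sentence in enumerate(sentences):
--             formatted_sentences.append(sentence)
--             if i % 3 == 2 and i < len(sentences) - 1:
--                 formatted_sentences.append('\n\n')
--             elif i < len(sentences) - 1:
--                 formatted_sentences.append('. ')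
--         content = ''.join(formatted_sentences)
--
--     return content
-- ===== SOURCE B (Python) =====
-- def _format_linkedin_content(content: str) -> str:
--     """Format content for LinkedIn: paragraph break after every third sentence."""
--     sentences = content.split('. ')
--     if len(sentences) > 3:
--         chunks = [sentences[i:i+3] for i in range(0, len(sentences), 3)]
--         content = '\n\n'.join('. '.join(chunk) for chunk in chunks)
--     return content
-- ===== Notes on version B (the rewrite author's own statement) =====
-- stated objective: simpler
-- what changed: Replaces A's enumerate loop that appends a sentence separator or a paragraph break depending on index parity (i % 3) with direct grouping of the sentences into chunks of three and two nested joins.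
import Mathlib
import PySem

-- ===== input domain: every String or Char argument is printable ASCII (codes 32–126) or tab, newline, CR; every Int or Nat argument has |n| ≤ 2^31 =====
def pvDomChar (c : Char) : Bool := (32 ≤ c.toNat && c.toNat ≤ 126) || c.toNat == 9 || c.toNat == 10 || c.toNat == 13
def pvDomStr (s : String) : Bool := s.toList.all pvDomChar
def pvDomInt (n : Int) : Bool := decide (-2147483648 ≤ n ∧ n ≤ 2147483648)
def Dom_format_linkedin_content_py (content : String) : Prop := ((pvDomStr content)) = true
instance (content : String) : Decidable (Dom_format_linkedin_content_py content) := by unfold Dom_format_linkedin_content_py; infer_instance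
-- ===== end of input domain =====

-- B replaces A's index-parity separator loop by grouping the sentences into chunks of three and joining them; objective: simpler.

-- ===== PORT A =====
def format_linkedin_content_py (content : String) : String :=
  let sentences := (PySem.Str.split? content ". ").getD []
  if sentences.length > 3 then
    let formatted_sentences :=
      (PySem.List.enumerate sentences 0).foldl
        (fun acc p =>
          let acc := acc ++ [p.2]
          if PySem.Int.mod p.1 3 = 2 ∧ p.1 < (sentences.length : Int) - 1 then acc ++ ["\n\n"]
          else if p.1 < (sentences.length : Int) - 1 then acc ++ [". "]
          else acc) []
    PySem.Str.join "" formatted_sentences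
  else content

-- ===== PORT B =====
def format_linkedin_content_py_alt (content : String) : String :=
  let sentences := (PySem.Str.split? content ". ").getD []
  if sentences.length > 3 then
    let chunks := (PySem.List.pyRange 0 (sentences.length : Int) 3).map
      (fun i => PySem.List.slice sentences (some i) (some (i + 3)))
    PySem.Str.join "\n\n" (chunks.map (fun chunk => PySem.Str.join ". " chunk))
  else content

-- ===== PRECONDITION & SPEC =====
def Spec_format_linkedin_content_py (content : String) (out : String) : Prop := out = format_linkedin_content_py_alt content
instance (content : String) (out : String) : Decidable (Spec_format_linkedin_content_py content out) := by unfold Spec_format_linkedin_content_py; infer_instance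

-- ===== CLAIM (what is proved, stated in full; the proofs are below) =====
def Claim_equal_format_linkedin_content_py : Prop := ∀ (content : String), Dom_format_linkedin_content_py content → Spec_format_linkedin_content_py content (format_linkedin_content_py content)

-- ===== LEMMAS AND PROOFS =====

-- the separator A's loop appends after the sentence at index i (n = total number of sentences)
def pvSep (n i : Int) : List String :=
  if PySem.Int.mod i 3 = 2 ∧ i < n - 1 then ["\n\n"]
  else if i < n - 1 then [". "]
  else []

-- groups of three consecutive sentences, as B builds them
def pvChunks3 : List String → List (List String)
  | [] => []
  | x :: rest => ((x :: rest).take 3) :: pvChunks3 ((x :: rest).drop 3)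
  termination_by ss => ss.length

theorem pv_mod3 (k : Int) : PySem.Int.mod k 3 = k % 3 := by
  simp [PySem.Int.mod, Int.fmod_eq_emod]

-- A's fold is an append-only fold, hence a flatMap
theorem pv_foldA (n : Int) (ps : List (Int × String)) (acc : List String) :
    ps.foldl
      (fun acc p =>
        let acc := acc ++ [p.2]
        if PySem.Int.mod p.1 3 = 2 ∧ p.1 < n - 1 then acc ++ ["\n\n"]
        else if p.1 < n - 1 then acc ++ [". "]
        else acc) acc
    = acc ++ ps.flatMap (fun p => p.2 :: pvSep n p.1) := by
  have hfun : (fun (acc : List String) (p : Int × String) =>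
        let acc := acc ++ [p.2]
        if PySem.Int.mod p.1 3 = 2 ∧ p.1 < n - 1 then acc ++ ["\n\n"]
        else if p.1 < n - 1 then acc ++ [". "]
        else acc)
      = fun acc p => acc ++ (p.2 :: pvSep n p.1) := by
    funext acc p
    simp only [pvSep]
    split_ifs <;> simp
  rw [hfun, PySem.List.foldl_append_eq_flatMap]

theorem pv_join_nil_flatten (xs : List (List Char)) :
    PySem.Chars.join [] xs = xs.flatten := by
  induction xs with
  | nil => simp [PySem.Chars.join_nil]
  | cons x t ih =>
    cases t with
    | nil => simp [PySem.Chars.join_singleton]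
    | cons y r =>
      rw [PySem.Chars.join_cons_cons]
      simp only [List.flatten_cons] at *
      simp [ih]

-- main correspondence: the flatMap with index-parity separators equals joining chunks of three
theorem pv_main (m : Nat) : ∀ (ss : List String) (k n : Int), ss.length ≤ m → ss ≠ [] →
    0 ≤ k → k % 3 = 0 → n = k + ss.length →
    PySem.Chars.join []
        (((PySem.List.enumerate ss k).flatMap (fun p => p.2 :: pvSep n p.1)).map String.toList)
      = PySem.Chars.join "\n\n".toList
        ((pvChunks3 ss).map (fun c => PySem.Chars.join ". ".toList (c.map String.toList))) := by
  induction m with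
  | zero =>
    intro ss _ _ hm hne _ _ _
    cases ss with
    | nil => exact absurd rfl hne
    | cons a t => simp at hm
  | succ m ih =>
    intro ss k n hm hne hk0 hk3 hn
    match ss with
    | [a] =>
      have hlast : ¬ (k < n - 1) := by simp at hn; omega
      simp [PySem.List.enumerate_cons, PySem.List.enumerate_nil, pvSep, hlast,
        pvChunks3, PySem.Chars.join_singleton]
    | [a, b] =>
      have h1 : pvSep n k = [". "] := by
        unfold pvSep; rw [pv_mod3]; rw [if_neg (by simp at hn; omega), if_pos (by simp at hn; omega)]
      have h2 : pvSep n (k + 1) = [] := by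
        unfold pvSep; rw [pv_mod3]; rw [if_neg (by simp at hn; omega), if_neg (by simp at hn; omega)]
      simp [PySem.List.enumerate_cons, PySem.List.enumerate_nil, h1, h2, pvChunks3,
        PySem.Chars.join_singleton, PySem.Chars.join_cons_cons]
    | [a, b, c] =>
      have h1 : pvSep n k = [". "] := by
        unfold pvSep; rw [pv_mod3]; rw [if_neg (by simp at hn; omega), if_pos (by simp at hn; omega)]
      have h2 : pvSep n (k + 1) = [". "] := by
        unfold pvSep; rw [pv_mod3]; rw [if_neg (by simp at hn; omega), if_pos (by simp at hn; omega)]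
      have h3 : pvSep n (k + 1 + 1) = [] := by
        unfold pvSep; rw [pv_mod3]; rw [if_neg (by simp at hn; omega), if_neg (by simp at hn; omega)]
      simp [PySem.List.enumerate_cons, PySem.List.enumerate_nil, h1, h2, h3, pvChunks3,
        PySem.Chars.join_singleton, PySem.Chars.join_cons_cons]
    | a :: b :: c :: d :: rest =>
      have hn' : n = k + 4 + rest.length := by simp at hn; omega
      have h1 : pvSep n k = [". "] := by
        unfold pvSep; rw [pv_mod3]; rw [if_neg (by omega), if_pos (by omega)]
      have h2 : pvSep n (k + 1) = [". "] := by
        unfold pvSep; rw [pv_mod3]; rw [if_neg (by omega), if_pos (by omega)]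
      have h3 : pvSep n (k + 1 + 1) = ["\n\n"] := by
        unfold pvSep; rw [pv_mod3]; rw [if_pos (by constructor <;> omega)]
      have htl : (d :: rest).length ≤ m := by simp at hm ⊢; omega
      have ihtl := ih (d :: rest) (k + 3) n htl (by simp) (by omega) (by omega)
        (by simp at hn ⊢; omega)
      rw [pv_join_nil_flatten] at ihtl ⊢
      have hk12 : k + 1 + 1 + 1 = k + 3 := by omega
      simp only [PySem.List.enumerate_cons, List.flatMap_cons, h1, h2, h3, hk12]
      have hchunks : pvChunks3 (a :: b :: c :: d :: rest) = [a, b, c] :: pvChunks3 (d :: rest) := by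
        rw [pvChunks3]; rfl
      rw [hchunks]
      have hcne : ∃ p q, (pvChunks3 (d :: rest)).map
          (fun c => PySem.Chars.join ". ".toList (c.map String.toList)) = p :: q := by
        rw [pvChunks3]; exact ⟨_, _, rfl⟩
      obtain ⟨p, q, hpq⟩ := hcne
      simp only [List.map_cons, hpq, PySem.Chars.join_cons_cons]
      rw [← hpq, ← ihtl]
      simp [PySem.Chars.join_singleton]

theorem pv_range3_cons (n : Int) (h : 0 < n) :
    PySem.List.pyRange 0 n 3 = 0 :: (PySem.List.pyRange 0 (n - 3) 3).map (· + 3) := by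
  rw [PySem.List.pyRange_of_pos _ _ (by norm_num), PySem.List.pyRange_of_pos _ _ (by norm_num)]
  rw [if_pos h]
  by_cases h3 : 0 < n - 3
  · rw [if_pos h3]
    have hc : ((n - 0 + 3 - 1) / 3).toNat = ((n - 3 - 0 + 3 - 1) / 3).toNat + 1 := by omega
    rw [hc, List.range_succ_eq_map]
    simp only [List.map_cons, List.map_map]
    congr 1
  · rw [if_neg h3]
    have hc : ((n - 0 + 3 - 1) / 3).toNat = 1 := by omega
    rw [hc]
    simp [List.range_succ]

theorem pv_chunks_eq (m : Nat) : ∀ (ss : List String), ss.length ≤ m →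
    (PySem.List.pyRange 0 (ss.length : Int) 3).map
      (fun i => PySem.List.slice ss (some i) (some (i + 3))) = pvChunks3 ss := by
  induction m with
  | zero =>
    intro ss hm
    have : ss = [] := List.length_eq_zero_iff.mp (by omega)
    subst this
    simp [PySem.List.pyRange, pvChunks3]
  | succ m ih =>
    intro ss hm
    cases hss : ss with
    | nil => simp [PySem.List.pyRange, pvChunks3]
    | cons a t =>
      have hpos : 0 < (ss.length : Int) := by rw [hss]; simp
      rw [← hss]
      rw [pv_range3_cons _ hpos]
      simp only [List.map_cons, List.map_map]
      have hhead : PySem.List.slice ss (some 0) (some (0 + 3)) = ss.take 3 := by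
        have : ((0 : Int) + 3) = ((3 : Nat) : Int) := by norm_num
        rw [this, PySem.List.slice_zero_start, PySem.List.slice_to_natCast]
      have hbody : ∀ i ∈ PySem.List.pyRange 0 ((ss.length : Int) - 3) 3,
          PySem.List.slice ss (some (i + 3)) (some ((i + 3) + 3)) =
          PySem.List.slice (ss.drop 3) (some i) (some (i + 3)) := by
        intro i hi
        have hi0 : 0 ≤ i := by
          rcases (PySem.List.mem_pyRange_iff_of_pos (by norm_num : (0:Int) < 3) i).mp hi with ⟨hlo, _, _⟩
          omega
        rw [PySem.List.slice_toNat _ (by omega) (by omega),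
            PySem.List.slice_toNat _ (by omega) (by omega)]
        rw [List.drop_drop]
        have e1 : ((i + 3) + 3).toNat - (i + 3).toNat = 3 := by omega
        have e2 : (i + 3).toNat - i.toNat = 3 := by omega
        have e3 : (3 : Nat) + i.toNat = (i + 3).toNat := by omega
        rw [e1, e2, e3]
      have htail : (PySem.List.pyRange 0 ((ss.length : Int) - 3) 3).map
          ((fun i => PySem.List.slice ss (some i) (some (i + 3))) ∘ (· + 3)) =
          pvChunks3 (ss.drop 3) := by
        by_cases hlen3 : ss.length ≤ 3
        · have hd3 : ss.drop 3 = [] := by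
            apply List.eq_nil_of_length_eq_zero; simp; omega
          have hr : PySem.List.pyRange 0 ((ss.length : Int) - 3) 3 = [] := by
            rw [PySem.List.pyRange_of_pos _ _ (by norm_num : (0:Int) < 3), if_neg (by omega)]
            simp
          rw [hr, hd3]; simp [pvChunks3]
        · have hd3len : ((ss.drop 3).length : Int) = (ss.length : Int) - 3 := by
            simp; omega
          rw [List.map_congr_left (fun i hi => by
            simp only [Function.comp_apply]; exact hbody i hi)]
          rw [← hd3len]
          exact ih (ss.drop 3) (by simp; rw [hss] at hm ⊢; simp at hm ⊢; omega)
      rw [hhead]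
      rw [htail]
      rw [hss, pvChunks3]

-- ===== VERDICT (by name: the statement is the Claim_ definition above) =====
theorem format_linkedin_content_py_spec : Claim_equal_format_linkedin_content_py := by
  unfold Claim_equal_format_linkedin_content_py
  intro content _
  unfold Spec_format_linkedin_content_py format_linkedin_content_py format_linkedin_content_py_alt
  set ss := (PySem.Str.split? content ". ").getD [] with hss
  by_cases hlen : ss.length > 3
  · simp only [if_pos hlen]
    rw [pv_foldA]
    simp only [List.nil_append]
    rw [pv_chunks_eq ss.length ss le_rfl]
    have h := pv_main ss.length ss 0 (ss.length : Int) le_rfl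
      (by intro h; rw [h] at hlen; simp at hlen) le_rfl (by norm_num) (by simp)
    unfold PySem.Str.join
    congr 1
    simp only [List.map_map, Function.comp_def, String.toList_ofList]
    simpa using h
  · simp only [if_neg hlen]
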